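-- pv_equiv track=rewrite | github.com/yuvals41/citetrack | apps/api/ai_visibility/diagnosis/onpage.py | _is_user_agent_disallowed
-- ===== SOURCE A (Python) =====
-- def _is_user_agent_disallowed(robots_txt: str, user_agent: str) -> bool:
--     normalized_agent = user_agent.strip().lower()
--     parsed_rules = _parse_robots_groups(robots_txt)
--
--     exact_disallow_paths: list[str] = []
--     wildcard_disallow_paths: list[str] = []
--     for agents, directives in parsed_rules:
--         disallow_paths = [value for directive, value in directives if directive == "disallow" and value]
--         if not disallow_paths:
--             continue
--
--         if normalized_agent in agents:
--             exact_disallow_paths.extend(disallow_paths)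
--         elif "*" in agents:
--             wildcard_disallow_paths.extend(disallow_paths)
--
--     if exact_disallow_paths:
--         return True
--     return bool(wildcard_disallow_paths)
--
-- def _parse_robots_groups(robots_txt: str) -> list[tuple[set[str], list[tuple[str, str]]]]:
--     groups: list[tuple[set[str], list[tuple[str, str]]]] = []
--     current_agents: set[str] = set()
--     current_directives: list[tuple[str, str]] = []
--
--     for raw_line in robots_txt.splitlines():
--         line = raw_line.split("#", maxsplit=1)[0].strip()
--         if not line or ":" not in line:
--             continue
--
--         directive, value = line.split(":", maxsplit=1)
--         normalized_directive = directive.strip().lower()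
--         normalized_value = value.strip().lower()
--         if not normalized_directive:
--             continue
--
--         if normalized_directive == "user-agent":
--             if current_directives:
--                 groups.append((set(current_agents), list(current_directives)))
--                 current_agents.clear()
--                 current_directives.clear()
--             if normalized_value:
--                 current_agents.add(normalized_value)
--             continue
--
--         if not current_agents:
--             continue
--
--         current_directives.append((normalized_directive, normalized_value))
--
--     if current_agents:
--         groups.append((set(current_agents), list(current_directives)))
--     return groups
-- ===== SOURCE B (Python) =====
-- def _is_user_agent_disallowed(robots_txt: str, user_agent: str) -> bool:
--     # Single streaming pass: flags instead of building group/directive lists.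
--     target = user_agent.strip().lower()
--     agents = set()
--     seen_directive = False
--     has_disallow = False
--     exact = False
--     wildcard = False
--
--     def close():
--         nonlocal exact, wildcard
--         if has_disallow:
--             if target in agents:
--                 exact = True
--             elif "*" in agents:
--                 wildcard = True
--
--     for raw_line in robots_txt.splitlines():
--         line = raw_line.split("#", 1)[0].strip()
--         if not line or ":" not in line:
--             continue
--         directive, value = line.split(":", 1)
--         directive = directive.strip().lower()
--         value = value.strip().lower()
--         if not directive:
--             continue
--         if directive == "user-agent":
--             if seen_directive:
--                 close()
--                 agents = set()
--                 seen_directive = False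
--                 has_disallow = False
--             if value:
--                 agents.add(value)
--         elif agents:
--             seen_directive = True
--             if directive == "disallow" and value:
--                 has_disallow = True
--
--     close()
--     return exact or wildcard
-- ===== Notes on version B (the rewrite author's own statement) =====
-- stated objective: simpler
-- what changed: B replaces A's two-phase design (parse robots.txt into a list of (agent-set, directive-list) groups, then scan the groups accumulating two path lists) with a single streaming pass over the lines that keeps only an agent set and four boolean flags, never building the intermediate group/directive/path lists.
import Mathlib
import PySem

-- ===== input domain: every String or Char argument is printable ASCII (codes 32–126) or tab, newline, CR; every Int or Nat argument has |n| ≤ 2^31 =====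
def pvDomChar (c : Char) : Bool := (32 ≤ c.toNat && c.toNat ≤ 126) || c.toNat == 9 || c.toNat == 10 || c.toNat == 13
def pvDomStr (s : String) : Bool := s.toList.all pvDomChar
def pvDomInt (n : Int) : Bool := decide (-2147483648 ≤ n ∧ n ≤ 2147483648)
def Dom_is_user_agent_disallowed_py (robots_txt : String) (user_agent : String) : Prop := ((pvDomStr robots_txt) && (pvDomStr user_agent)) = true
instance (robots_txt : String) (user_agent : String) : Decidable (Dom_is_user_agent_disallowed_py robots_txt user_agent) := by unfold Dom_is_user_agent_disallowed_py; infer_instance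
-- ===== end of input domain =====

-- B replaces A's two-phase parse-into-group-lists-then-scan with a single streaming pass
-- that keeps only boolean flags (simpler: no intermediate group/directive lists are built).

-- shared line cleaning (both Pythons contain literally these steps):
-- line = raw.split('#',1)[0].strip(); skip if empty or no ':'; split(':',1); strip+lower both; skip if directive empty
def pvParseLine (raw : String) : Option (String × String) :=
  let line := PySem.Str.strip (((PySem.Str.splitMax? raw "#" 1).getD [raw]).headD raw)
  if line = "" then none
  else if PySem.Str.isIn ":" line = false then none
  else
    match (PySem.Str.splitMax? line ":" 1).getD [] with
    | [] => none
    | d :: rest =>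
      let nd := PySem.Str.lower (PySem.Str.strip d)
      let nv := PySem.Str.lower (PySem.Str.strip (rest.headD ""))
      if nd = "" then none else some (nd, nv)

-- ===== PORT A =====
-- state: (groups, current_agents, current_directives)
def pvAStep (st : List (PySem.Set String × List (String × String)) × PySem.Set String × List (String × String))
    (raw : String) : List (PySem.Set String × List (String × String)) × PySem.Set String × List (String × String) :=
  match pvParseLine raw with
  | none => st
  | some (d, v) =>
    let (groups, curA, curD) := st
    if d = "user-agent" then
      let (groups, curA, curD) :=
        if curD.isEmpty then (groups, curA, curD)
        else (groups ++ [(curA, curD)], (PySem.Set.empty : PySem.Set String), ([] : List (String × String)))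
      let curA := if v ≠ "" then PySem.Set.add curA v else curA
      (groups, curA, curD)
    else if curA.isEmpty then (groups, curA, curD)
    else (groups, curA, curD ++ [(d, v)])

def pvParseRobotsGroups (robots_txt : String) : List (PySem.Set String × List (String × String)) :=
  let st := (PySem.Str.splitlines robots_txt).foldl pvAStep ([], PySem.Set.empty, [])
  if st.2.1.isEmpty then st.1 else st.1 ++ [(st.2.1, st.2.2)]

def is_user_agent_disallowed_py (robots_txt : String) (user_agent : String) : Bool :=
  let na := PySem.Str.lower (PySem.Str.strip user_agent)
  let rules := pvParseRobotsGroups robots_txt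
  let r := rules.foldl (fun (acc : List String × List String) g =>
    let dps := (g.2.filter (fun p => p.1 == "disallow" && p.2 != "")).map (·.2)
    if dps.isEmpty then acc
    else if PySem.Set.contains g.1 na then (acc.1 ++ dps, acc.2)
    else if PySem.Set.contains g.1 "*" then (acc.1, acc.2 ++ dps)
    else acc) ([], [])
  if !r.1.isEmpty then true else !r.2.isEmpty

-- ===== PORT B =====
-- close(): fold the pending group's flags into the two result flags
def pvBClose (target : String) (agents : PySem.Set String) (hasDis exact wild : Bool) : Bool × Bool :=
  if hasDis then
    if PySem.Set.contains agents target then (true, wild)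
    else if PySem.Set.contains agents "*" then (exact, true)
    else (exact, wild)
  else (exact, wild)

-- state: (agents, seen_directive, has_disallow, exact, wildcard)
def pvBStep (target : String) (st : PySem.Set String × Bool × Bool × Bool × Bool) (raw : String) :
    PySem.Set String × Bool × Bool × Bool × Bool :=
  match pvParseLine raw with
  | none => st
  | some (d, v) =>
    let (agents, seen, hasD, ex, wi) := st
    if d = "user-agent" then
      let (agents, seen, hasD, ex, wi) :=
        if seen then
          let fw := pvBClose target agents hasD ex wi
          ((PySem.Set.empty : PySem.Set String), false, false, fw.1, fw.2)
        else (agents, seen, hasD, ex, wi)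
      ((if v ≠ "" then PySem.Set.add agents v else agents), seen, hasD, ex, wi)
    else if agents.isEmpty = false then
      (agents, true, hasD || (d == "disallow" && v != ""), ex, wi)
    else st

def is_user_agent_disallowed_py_alt (robots_txt : String) (user_agent : String) : Bool :=
  let target := PySem.Str.lower (PySem.Str.strip user_agent)
  let st := (PySem.Str.splitlines robots_txt).foldl (pvBStep target) (PySem.Set.empty, false, false, false, false)
  let fw := pvBClose target st.1 st.2.2.1 st.2.2.2.1 st.2.2.2.2
  fw.1 || fw.2

-- ===== PRECONDITION & SPEC =====
def Spec_is_user_agent_disallowed_py (robots_txt : String) (user_agent : String) (out : Bool) : Prop := out = is_user_agent_disallowed_py_alt robots_txt user_agent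
instance (robots_txt : String) (user_agent : String) (out : Bool) : Decidable (Spec_is_user_agent_disallowed_py robots_txt user_agent out) := by unfold Spec_is_user_agent_disallowed_py; infer_instance

-- ===== CLAIM (what is proved, stated in full; the proofs are below) =====
def Claim_equal_is_user_agent_disallowed_py : Prop := ∀ (robots_txt : String) (user_agent : String), Dom_is_user_agent_disallowed_py robots_txt user_agent → Spec_is_user_agent_disallowed_py robots_txt user_agent (is_user_agent_disallowed_py robots_txt user_agent)

-- ===== LEMMAS AND PROOFS =====

def pvHasDis (dirs : List (String × String)) : Bool := dirs.any (fun p => p.1 == "disallow" && p.2 != "")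

def pvFlags (target : String) (groups : List (PySem.Set String × List (String × String))) : Bool × Bool :=
  groups.foldl (fun fw g => pvBClose target g.1 (pvHasDis g.2) fw.1 fw.2) (false, false)

def pvAFold (target : String) (acc : List String × List String)
    (g : PySem.Set String × List (String × String)) : List String × List String :=
  let dps := (g.2.filter (fun p => p.1 == "disallow" && p.2 != "")).map (·.2)
  if dps.isEmpty then acc
  else if PySem.Set.contains g.1 target then (acc.1 ++ dps, acc.2)
  else if PySem.Set.contains g.1 "*" then (acc.1, acc.2 ++ dps)
  else acc

lemma pvDpsEmpty (l : List (String × String)) :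
    ((l.filter (fun p => p.1 == "disallow" && p.2 != "")).map (·.2)).isEmpty = !pvHasDis l := by
  induction l with
  | nil => rfl
  | cons x t ih =>
    by_cases h : (x.1 == "disallow" && x.2 != "") = true
    · simp [pvHasDis, h]
    · simp only [Bool.not_eq_true] at h
      simp [pvHasDis, h] at ih ⊢
      exact ih

-- A's path-list fold produces non-emptiness flags equal to the pvBClose-flag fold
lemma pvPathsFlags (target : String) (rules : List (PySem.Set String × List (String × String)))
    (accE accW : List String) :
    ((!(rules.foldl (pvAFold target) (accE, accW)).1.isEmpty),
     (!(rules.foldl (pvAFold target) (accE, accW)).2.isEmpty))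
    = rules.foldl (fun fw g => pvBClose target g.1 (pvHasDis g.2) fw.1 fw.2)
        (!accE.isEmpty, !accW.isEmpty) := by
  induction rules generalizing accE accW with
  | nil => rfl
  | cons g rest ih =>
    simp only [List.foldl_cons]
    by_cases hD : pvHasDis g.2 = true
    · have hne : ((g.2.filter (fun p => p.1 == "disallow" && p.2 != "")).map (·.2)).isEmpty = false := by
        rw [pvDpsEmpty, hD]; rfl
      have hmem : ¬ ((g.2.filter (fun p => p.1 == "disallow" && p.2 != "")).map (·.2)) = [] := by
        simpa [List.isEmpty_iff] using hne
      by_cases ht : target ∈ g.1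
      · rw [show pvAFold target (accE, accW) g
            = (accE ++ (g.2.filter (fun p => p.1 == "disallow" && p.2 != "")).map (·.2), accW) from by
              simp [pvAFold, hne, ht]]
        rw [ih]
        congr 1
        simp [pvBClose, hD, ht, hmem]
      · by_cases hw : "*" ∈ g.1
        · rw [show pvAFold target (accE, accW) g
              = (accE, accW ++ (g.2.filter (fun p => p.1 == "disallow" && p.2 != "")).map (·.2)) from by
                simp [pvAFold, hne, ht, hw]]
          rw [ih]
          congr 1
          simp [pvBClose, hD, ht, hw, hmem]
        · rw [show pvAFold target (accE, accW) g = (accE, accW) from by simp [pvAFold, hne, ht, hw]]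
          rw [ih]
          congr 1
          simp [pvBClose, hD, ht, hw]
    · simp only [Bool.not_eq_true] at hD
      have hne : ((g.2.filter (fun p => p.1 == "disallow" && p.2 != "")).map (·.2)).isEmpty = true := by
        rw [pvDpsEmpty, hD]; rfl
      rw [show pvAFold target (accE, accW) g = (accE, accW) from by simp [pvAFold, hne]]
      rw [ih]
      congr 1
      simp [pvBClose, hD]

-- simulation: B's streamed state mirrors A's parser state
lemma pvSim (target : String) (lines : List String)
    (groups : List (PySem.Set String × List (String × String)))
    (curA : PySem.Set String) (curD : List (String × String))
    (hinv : curD ≠ [] → curA.isEmpty = false) :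
    lines.foldl (pvBStep target) (curA, !curD.isEmpty, pvHasDis curD, (pvFlags target groups).1, (pvFlags target groups).2)
      = (let st := lines.foldl pvAStep (groups, curA, curD)
         (st.2.1, !st.2.2.isEmpty, pvHasDis st.2.2, (pvFlags target st.1).1, (pvFlags target st.1).2))
    ∧ ((lines.foldl pvAStep (groups, curA, curD)).2.2 ≠ [] →
        (lines.foldl pvAStep (groups, curA, curD)).2.1.isEmpty = false) := by
  induction lines generalizing groups curA curD with
  | nil => exact ⟨rfl, hinv⟩
  | cons raw rest ih =>
    cases hp : pvParseLine raw with
    | none =>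
      simp only [List.foldl_cons, pvBStep, pvAStep, hp]
      exact ih groups curA curD hinv
    | some dv =>
      obtain ⟨d, v⟩ := dv
      by_cases hd : d = "user-agent"
      · by_cases hcd : curD.isEmpty
        · have hcd' : curD = [] := by simpa [List.isEmpty_iff] using hcd
          simp only [List.foldl_cons, pvBStep, pvAStep, hp, hd, hcd',
            List.isEmpty_nil, Bool.not_true, if_true]
          exact ih groups _ [] (fun h => absurd rfl h)
        · have hcd' : curD.isEmpty = false := by simpa using hcd
          have hseen : (!curD.isEmpty) = true := by simp [hcd']
          simp only [List.foldl_cons, pvBStep, pvAStep, hp, hd, hcd',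
            Bool.false_eq_true, if_false, if_true]
          have hfl : pvFlags target (groups ++ [(curA, curD)])
              = (pvBClose target curA (pvHasDis curD) (pvFlags target groups).1 (pvFlags target groups).2) := by
            simp [pvFlags, List.foldl_append]
          have := ih (groups ++ [(curA, curD)])
            (if v ≠ "" then PySem.Set.add PySem.Set.empty v else PySem.Set.empty) []
            (fun h => absurd rfl h)
          rw [hfl] at this
          simpa [pvHasDis] using this
      · by_cases hA : curA.isEmpty
        · simp only [List.foldl_cons, pvBStep, pvAStep, hp, hd, hA, Bool.true_eq_false,
            if_false, reduceIte]
          exact ih groups curA curD hinv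
        · have hA' : curA.isEmpty = false := by simpa using hA
          simp only [List.foldl_cons, pvBStep, pvAStep, hp, hd, hA', if_false, reduceIte]
          have hh : pvHasDis (curD ++ [(d, v)]) = (pvHasDis curD || (d == "disallow" && v != "")) := by
            simp [pvHasDis]
          have := ih groups curA (curD ++ [(d, v)]) (fun _ => hA')
          rw [hh] at this
          have hne : (!(curD ++ [(d, v)]).isEmpty) = true := by simp
          rw [hne] at this
          exact this

lemma pvAResult (target : String) (rules : List (PySem.Set String × List (String × String))) :
    (if !(rules.foldl (pvAFold target) ([], [])).1.isEmpty then true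
     else !(rules.foldl (pvAFold target) ([], [])).2.isEmpty)
    = ((pvFlags target rules).1 || (pvFlags target rules).2) := by
  have h' : ((!(rules.foldl (pvAFold target) (([] : List String), ([] : List String))).1.isEmpty),
             (!(rules.foldl (pvAFold target) (([] : List String), ([] : List String))).2.isEmpty))
      = pvFlags target rules := pvPathsFlags target rules [] []
  rw [← h']
  cases (rules.foldl (pvAFold target) (([] : List String), ([] : List String))).1.isEmpty <;> simp

-- ===== VERDICT (by name: the statement is the Claim_ definition above) =====
theorem is_user_agent_disallowed_py_spec : Claim_equal_is_user_agent_disallowed_py := by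
  intro robots ua _
  show is_user_agent_disallowed_py robots ua = is_user_agent_disallowed_py_alt robots ua
  simp only [is_user_agent_disallowed_py, is_user_agent_disallowed_py_alt, pvParseRobotsGroups]
  rw [show (fun (acc : List String × List String) g =>
        let dps := (g.2.filter (fun p => p.1 == "disallow" && p.2 != "")).map (·.2)
        if dps.isEmpty then acc
        else if PySem.Set.contains g.1 (PySem.Str.lower (PySem.Str.strip ua)) then (acc.1 ++ dps, acc.2)
        else if PySem.Set.contains g.1 "*" then (acc.1, acc.2 ++ dps)
        else acc) = pvAFold (PySem.Str.lower (PySem.Str.strip ua)) from rfl]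
  obtain ⟨hsim, hinv⟩ := pvSim (PySem.Str.lower (PySem.Str.strip ua)) (PySem.Str.splitlines robots)
    [] PySem.Set.empty [] (fun h => absurd rfl h)
  have hsim' : (PySem.Str.splitlines robots).foldl (pvBStep (PySem.Str.lower (PySem.Str.strip ua)))
        (PySem.Set.empty, false, false, false, false)
      = (let st := (PySem.Str.splitlines robots).foldl pvAStep ([], PySem.Set.empty, [])
         (st.2.1, !st.2.2.isEmpty, pvHasDis st.2.2,
          (pvFlags (PySem.Str.lower (PySem.Str.strip ua)) st.1).1,
          (pvFlags (PySem.Str.lower (PySem.Str.strip ua)) st.1).2)) := hsim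
  rw [hsim', pvAResult]
  set st := (PySem.Str.splitlines robots).foldl pvAStep ([], PySem.Set.empty, []) with hstd
  by_cases hA : st.2.1.isEmpty
  · have hD : st.2.2 = [] := by
      by_contra h
      rw [hinv h] at hA
      exact Bool.false_ne_true hA
    simp [hA, hD, pvHasDis, pvBClose]
  · have hA' : st.2.1.isEmpty = false := by simpa using hA
    simp [hA', pvFlags, List.foldl_append]
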